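-- pv_equiv track=rewrite | github.com/JasonXYJing/ExtendedSketch | extendedsketch.py | column_extension
-- ===== SOURCE A (Python) =====
-- def column_extension(column, array_num):
--     old_length = len(column)
--     new_column = [0] * (2 * old_length)
--     bit_location = [i for i, x in enumerate(column) if x == 1]
--
--     if array_num % 2 != 0:
--         for location in bit_location:
--             new_column[location] = 1
--     else:
--         for location in bit_location:
--             new_column[location+old_length] = 1
--     return new_column
-- ===== SOURCE B (Python) =====
-- def column_extension(column, array_num):
--     half = [1 if x == 1 else 0 for x in column]
--     zeros = [0] * len(column)
--     if array_num % 2 != 0: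
--         return half + zeros
--     else:
--         return zeros + half
-- ===== Notes on version B (the rewrite author's own statement) =====
-- stated objective: simpler
-- what changed: Replaces the preallocated 2n buffer, the bit_location index list and the scatter-assignment loop with a direct map of the column to its 0/1 half plus a single concatenation with a zero block.
import Mathlib
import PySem

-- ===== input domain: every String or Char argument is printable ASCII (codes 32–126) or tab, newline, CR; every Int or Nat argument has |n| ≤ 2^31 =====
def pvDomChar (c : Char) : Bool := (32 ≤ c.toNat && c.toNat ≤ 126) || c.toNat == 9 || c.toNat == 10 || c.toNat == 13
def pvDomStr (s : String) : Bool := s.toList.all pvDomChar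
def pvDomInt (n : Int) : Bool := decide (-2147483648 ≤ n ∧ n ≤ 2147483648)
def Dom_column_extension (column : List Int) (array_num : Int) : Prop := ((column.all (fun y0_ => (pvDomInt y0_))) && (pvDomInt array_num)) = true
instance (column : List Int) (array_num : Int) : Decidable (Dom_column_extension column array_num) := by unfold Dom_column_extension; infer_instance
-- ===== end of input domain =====

-- B builds the half-column by a single map and concatenates it with a zero block,
-- replacing A's preallocated 2n buffer, index list and scatter-assignment loop (objective: simpler).
-- ===== PORT A =====
def column_extension (column : List Int) (array_num : Int) : List Int :=
  let old_length := column.length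
  let new_column := List.replicate (2 * old_length) (0 : Int)
  let bit_location := ((PySem.List.enumerate column 0).filter (fun p => p.2 == 1)).map (fun p => p.1)
  if PySem.Int.mod array_num 2 != 0 then
    bit_location.foldl (fun nc location => PySem.List.pySetD nc location 1) new_column
  else
    bit_location.foldl (fun nc location => PySem.List.pySetD nc (location + (old_length : Int)) 1) new_column

-- ===== PORT B =====
def column_extension_alt (column : List Int) (array_num : Int) : List Int :=
  let half := column.map (fun x => if x == 1 then (1 : Int) else 0)
  let zeros := List.replicate column.length (0 : Int)
  if PySem.Int.mod array_num 2 != 0 then half ++ zeros else zeros ++ half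

-- ===== PRECONDITION & SPEC =====
def Spec_column_extension (column : List Int) (array_num : Int) (out : List Int) : Prop := out = column_extension_alt column array_num
instance (column : List Int) (array_num : Int) (out : List Int) : Decidable (Spec_column_extension column array_num out) := by unfold Spec_column_extension; infer_instance

-- ===== CLAIM (what is proved, stated in full; the proofs are below) =====
def Claim_equal_column_extension : Prop := ∀ (column : List Int) (array_num : Int), Dom_column_extension column array_num → Spec_column_extension column array_num (column_extension column array_num)

-- ===== LEMMAS AND PROOFS =====

-- indices of enumerate shift uniformly with the start value
lemma pv_locs_shift (col : List Int) : ∀ (s t : Int),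
    ((PySem.List.enumerate col (s + t)).filter (fun p => p.2 == 1)).map (fun p => p.1)
    = (((PySem.List.enumerate col s).filter (fun p => p.2 == 1)).map (fun p => p.1)).map (· + t) := by
  induction col with
  | nil => intro s t; simp [PySem.List.enumerate_nil]
  | cons x rest ih =>
    intro s t
    simp only [PySem.List.enumerate_cons, List.filter_cons]
    by_cases hx : x == 1
    · simp only [hx, if_pos, List.map_cons]
      have h1 : s + t + 1 = (s + 1) + t := by ring
      rw [h1, ih (s + 1) t]
    · simp only [hx, Bool.false_eq_true, if_false]
      have h1 : s + t + 1 = (s + 1) + t := by ring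
      rw [h1, ih (s + 1) t]

-- scattering 1s at the 1-positions of col into a zero block surrounded by pre/suf rewrites the block to col's 0/1 map
lemma pv_scatter (col : List Int) : ∀ (pre suf : List Int),
    ((((PySem.List.enumerate col ((pre.length : Int))).filter (fun p => p.2 == 1)).map (fun p => p.1)).foldl
      (fun nc location => PySem.List.pySetD nc location 1)
      (pre ++ List.replicate col.length (0 : Int) ++ suf))
    = pre ++ col.map (fun x => if x == 1 then (1 : Int) else 0) ++ suf := by
  induction col with
  | nil => intro pre suf; simp [PySem.List.enumerate_nil]
  | cons x rest ih =>
    intro pre suf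
    simp only [PySem.List.enumerate_cons, List.filter_cons, List.length_cons, List.replicate_succ]
    by_cases hx : x == 1
    · simp only [hx, if_pos, List.map_cons, List.foldl_cons]
      have hset : PySem.List.pySetD (pre ++ (0 : Int) :: (List.replicate rest.length 0 ++ suf)) ((pre.length : Int)) 1
          = (pre ++ [(1 : Int)]) ++ List.replicate rest.length 0 ++ suf := by
        rw [PySem.List.pySetD_natCast]
        rw [List.set_append_right _ _ (Nat.le_refl _)]
        simp
      have hbuf : pre ++ (0 : Int) :: List.replicate rest.length 0 ++ suf
          = pre ++ ((0 : Int) :: (List.replicate rest.length 0 ++ suf)) := by simp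
      rw [hbuf, hset]
      have hstart : (pre.length : Int) + 1 = (((pre ++ [(1 : Int)]).length : Int)) := by
        simp
      rw [hstart, ih (pre ++ [(1 : Int)]) suf]
      simp [hx]
    · simp only [hx, Bool.false_eq_true, if_false]
      have hbuf : pre ++ (0 : Int) :: List.replicate rest.length 0 ++ suf
          = (pre ++ [(0 : Int)]) ++ List.replicate rest.length 0 ++ suf := by simp
      rw [hbuf]
      have hstart : (pre.length : Int) + 1 = (((pre ++ [(0 : Int)]).length : Int)) := by simp
      rw [hstart, ih (pre ++ [(0 : Int)]) suf]
      have hx0 : x ≠ 1 := fun h => hx (by simp [h])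
      simp [hx0]

-- ===== VERDICT (by name: the statement is the Claim_ definition above) =====
theorem column_extension_spec : Claim_equal_column_extension := by
  intro column array_num _
  unfold Spec_column_extension column_extension column_extension_alt
  simp only []
  by_cases hodd : (PySem.Int.mod array_num 2 != 0) = true
  · simp only [hodd, if_true]
    have h := pv_scatter column [] (List.replicate column.length 0)
    simp only [List.nil_append, List.length_nil, Nat.cast_zero] at h
    have hb : List.replicate (2 * column.length) (0 : Int)
        = List.replicate column.length (0 : Int) ++ List.replicate column.length (0 : Int) := by
      rw [two_mul, List.replicate_add]
    rw [hb, h]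
  · rw [Bool.not_eq_true] at hodd
    simp only [hodd, Bool.false_eq_true, if_false]
    have hshift := pv_locs_shift column 0 (column.length : Int)
    have h := pv_scatter column (List.replicate column.length 0) []
    simp only [List.length_replicate] at h
    rw [zero_add] at hshift
    rw [show ((column.length : Int)) = (0 : Int) + (column.length : Int) by ring] at hshift
    rw [zero_add] at hshift
    calc (((PySem.List.enumerate column 0).filter (fun p => p.2 == 1)).map (fun p => p.1)).foldl
          (fun nc location => PySem.List.pySetD nc (location + (column.length : Int)) 1)
          (List.replicate (2 * column.length) (0 : Int))
        = ((((PySem.List.enumerate column 0).filter (fun p => p.2 == 1)).map (fun p => p.1)).map (· + (column.length : Int))).foldl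
          (fun nc location => PySem.List.pySetD nc location 1)
          (List.replicate (2 * column.length) (0 : Int)) := by simp only [List.foldl_map]
      _ = (((PySem.List.enumerate column ((column.length : Int))).filter (fun p => p.2 == 1)).map (fun p => p.1)).foldl
          (fun nc location => PySem.List.pySetD nc location 1)
          (List.replicate (2 * column.length) (0 : Int)) := by rw [hshift]
      _ = List.replicate column.length (0 : Int) ++ column.map (fun x => if x == 1 then (1 : Int) else 0) := by
          simp only [List.append_nil] at h
          have hb : List.replicate (2 * column.length) (0 : Int)
              = List.replicate column.length (0 : Int) ++ List.replicate column.length (0 : Int) := by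
            rw [two_mul, List.replicate_add]
          rw [hb]; exact h
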